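-- pv_equiv track=rewrite | github.com/ParzivalEugene/ADM | classworks/2/1.py | find_divisors_by_length
-- ===== SOURCE A (Python) =====
-- def find_divisors_by_length(n, length):
--     divisors = []
--     min_val = 10 ** (length - 1)
--     max_val = 10**length - 1
--
--     i = 1
--     while i * i <= n:
--         if n % i == 0:
--             if min_val <= i <= max_val:
--                 divisors.append(i)
--
--             if i != n // i:
--                 complement = n // i
--                 if min_val <= complement <= max_val:
--                     divisors.append(complement)
--         i += 1
--
--     return sorted(divisors)
-- ===== SOURCE B (Python) =====
-- def find_divisors_by_length(n, length):
--     if length < 1: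
--         return []
--     lo = 10 ** (length - 1)
--     hi = min(10 ** length - 1, n)
--     return [d for d in range(lo, hi + 1) if n % d == 0]
-- ===== Notes on version B (the rewrite author's own statement) =====
-- stated objective: simpler
-- what changed: B scans the digit-length window [10**(length-1), min(10**length-1, n)] testing divisibility directly, producing the list already in ascending order, instead of enumerating divisor pairs up to sqrt(n) and sorting at the end.
import Mathlib
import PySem

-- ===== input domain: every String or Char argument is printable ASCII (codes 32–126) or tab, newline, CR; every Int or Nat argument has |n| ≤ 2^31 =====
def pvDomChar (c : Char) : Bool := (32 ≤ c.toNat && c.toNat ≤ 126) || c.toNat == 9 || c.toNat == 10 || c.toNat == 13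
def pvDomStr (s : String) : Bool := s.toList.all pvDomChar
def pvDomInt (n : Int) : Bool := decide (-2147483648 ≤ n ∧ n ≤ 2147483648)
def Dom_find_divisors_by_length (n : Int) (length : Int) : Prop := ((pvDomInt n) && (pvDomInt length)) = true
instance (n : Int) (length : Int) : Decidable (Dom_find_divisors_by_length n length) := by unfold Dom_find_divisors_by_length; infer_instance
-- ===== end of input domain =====

-- B scans the digit-length value window and tests divisibility (already ascending, no sort),
-- instead of A's divisor-pair enumeration up to sqrt(n) followed by a sort; same results, similar cost.
set_option maxRecDepth 8192


-- ===== PORT A =====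
-- Python's window test `min_val <= x <= max_val` with min_val = 10**(length-1), max_val = 10**length - 1.
-- For length ≤ 0 Python's min_val is a FLOAT in (0,1) (and max_val is 0 for length = 0, a float in (-1,0)
-- for length < 0); on the integers x the loop tests, `min_val <= x` is then exactly `1 ≤ x` and
-- `x <= max_val` is exactly `x ≤ 0` (length = 0) resp. `x ≤ -1` (length < 0) — encoded exactly below.
def pvWinA (length : Int) (x : Int) : Bool :=
  if 1 ≤ length then decide ((10 : Int) ^ (length - 1).toNat ≤ x ∧ x ≤ 10 ^ length.toNat - 1)
  else if length = 0 then decide (1 ≤ x ∧ x ≤ 0)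
  else decide (1 ≤ x ∧ x ≤ -1)

-- body of A's while-loop for index i (the two conditional appends)
def pvStepA (n : Int) (length : Int) (i : Int) (divisors : List Int) : List Int :=
  if PySem.Int.mod n i = 0 then
    let d1 := if pvWinA length i then divisors ++ [i] else divisors
    if i ≠ PySem.Int.floordiv n i then
      if pvWinA length (PySem.Int.floordiv n i) then d1 ++ [PySem.Int.floordiv n i] else d1
    else d1
  else divisors

-- A's `while i * i <= n` loop
def pvLoopA (n : Int) (length : Int) (i : Int) (divisors : List Int) : List Int :=
  if h : i * i ≤ n then pvLoopA n length (i + 1) (pvStepA n length i divisors) else divisors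
termination_by (n + 1 - i).toNat
decreasing_by
  have hin : i ≤ n := by nlinarith [mul_self_nonneg i, mul_self_nonneg (i - 1)]
  omega

def find_divisors_by_length (n : Int) (length : Int) : List Int :=
  PySem.List.sorted (pvLoopA n length 1 []) (fun x => x) false

-- ===== PORT B =====
def find_divisors_by_length_alt (n : Int) (length : Int) : List Int :=
  if length < 1 then []
  else
    let lo : Int := 10 ^ (length - 1).toNat
    let hi : Int := min ((10 : Int) ^ length.toNat - 1) n
    (PySem.List.pyRange lo (hi + 1) 1).filter (fun d => PySem.Int.mod n d == 0)

-- ===== PRECONDITION & SPEC =====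
def Spec_find_divisors_by_length (n : Int) (length : Int) (out : List Int) : Prop := out = find_divisors_by_length_alt n length
instance (n : Int) (length : Int) (out : List Int) : Decidable (Spec_find_divisors_by_length n length out) := by unfold Spec_find_divisors_by_length; infer_instance

-- ===== CLAIM (what is proved, stated in full; the proofs are below) =====
def Claim_equal_find_divisors_by_length : Prop := ∀ (n : Int) (length : Int), Dom_find_divisors_by_length n length → Spec_find_divisors_by_length n length (find_divisors_by_length n length)

-- ===== LEMMAS AND PROOFS =====

-- membership across one iteration of A's loop body
lemma mem_pvStepA (n length i : Int) (acc : List Int) (d : Int) :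
    d ∈ pvStepA n length i acc ↔ d ∈ acc ∨
      (PySem.Int.mod n i = 0 ∧
        ((d = i ∧ pvWinA length i = true) ∨
         (i ≠ PySem.Int.floordiv n i ∧ d = PySem.Int.floordiv n i ∧ pvWinA length (PySem.Int.floordiv n i) = true))) := by
  unfold pvStepA
  split_ifs <;> (try simp only [List.mem_append, List.mem_singleton]) <;> tauto

-- membership in A's loop result: contributions of all indices j ≥ i
lemma mem_pvLoopA (n length : Int) :
    ∀ (i : Int) (acc : List Int), 1 ≤ i → ∀ d : Int,
      (d ∈ pvLoopA n length i acc ↔ d ∈ acc ∨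
        (∃ j : Int, i ≤ j ∧ j * j ≤ n ∧ PySem.Int.mod n j = 0 ∧
          ((d = j ∧ pvWinA length j = true) ∨
           (j ≠ PySem.Int.floordiv n j ∧ d = PySem.Int.floordiv n j ∧ pvWinA length (PySem.Int.floordiv n j) = true)))) := by
  intro i acc
  induction i, acc using pvLoopA.induct n length with
  | case1 i acc hle ih =>
    intro hi d
    rw [pvLoopA, dif_pos hle]
    rw [ih (by omega) d, mem_pvStepA]
    constructor
    · rintro ((hacc | hstep) | ⟨j, hij, hj2, hmod, hc⟩)
      · exact Or.inl hacc
      · exact Or.inr ⟨i, le_refl i, hle, hstep.1, hstep.2⟩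
      · exact Or.inr ⟨j, by omega, hj2, hmod, hc⟩
    · rintro (hacc | ⟨j, hij, hj2, hmod, hc⟩)
      · exact Or.inl (Or.inl hacc)
      · rcases eq_or_lt_of_le hij with heq | hlt
        · exact Or.inl (Or.inr (by rw [heq]; exact ⟨hmod, hc⟩))
        · exact Or.inr ⟨j, by omega, hj2, hmod, hc⟩
  | case2 i acc hgt =>
    intro hi d
    rw [pvLoopA, dif_neg hgt]
    constructor
    · exact Or.inl
    · rintro (hacc | ⟨j, hij, hj2, _, _⟩)
      · exact hacc
      · exfalso; exact hgt (by nlinarith)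

-- when the window test rejects everything (length ≤ 0), one step appends nothing
lemma pvStepA_win_false (n length i : Int) (acc : List Int) (hwin : ∀ x, pvWinA length x = false) :
    pvStepA n length i acc = acc := by
  unfold pvStepA
  split_ifs with h1 h2 h3 h4 <;> simp_all

-- ... hence A's whole loop appends nothing
lemma pvLoopA_win_false (n length : Int) (hwin : ∀ x, pvWinA length x = false) :
    ∀ (i : Int) (acc : List Int), pvLoopA n length i acc = acc := by
  intro i acc
  induction i, acc using pvLoopA.induct n length with
  | case1 i acc hle ih => rw [pvLoopA, dif_pos hle, ih, pvStepA_win_false n length i acc hwin]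
  | case2 i acc hgt => rw [pvLoopA, dif_neg hgt]

-- invariant carried by A's accumulator before iteration i: each element is a divisor,
-- recorded either as a small factor (index already passed) or as a cofactor of one
def pvInvA (n i d : Int) : Prop :=
  (1 ≤ d ∧ d ∣ n ∧ d * d ≤ n ∧ d < i) ∨ (1 ≤ d ∧ d ∣ n ∧ n < d * d ∧ n / d < i)

-- one loop-body step keeps the accumulator duplicate-free and re-establishes the invariant
lemma pvStepA_preserves (n length i : Int) (acc : List Int) (hi : 1 ≤ i) (hle : i * i ≤ n)
    (hnd : acc.Nodup) (hinv : ∀ d ∈ acc, pvInvA n i d) :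
    (pvStepA n length i acc).Nodup ∧ ∀ d ∈ pvStepA n length i acc, pvInvA n (i + 1) d := by
  have hmono : ∀ d ∈ acc, pvInvA n (i + 1) d := by
    intro d hd
    rcases hinv d hd with ⟨a, b, c, e⟩ | ⟨a, b, c, e⟩
    · exact Or.inl ⟨a, b, c, by omega⟩
    · exact Or.inr ⟨a, b, c, by omega⟩
  by_cases h1 : PySem.Int.mod n i = 0
  · have hdvd : i ∣ n := (PySem.Int.mod_eq_zero_iff_dvd n i).mp h1
    have hi0 : (0 : Int) < i := by omega
    have hfd : PySem.Int.floordiv n i = n / i := PySem.Int.floordiv_eq_ediv_of_pos hi0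
    obtain ⟨k, hk⟩ := hdvd
    have hki : n / i = k := by rw [hk]; exact Int.mul_ediv_cancel_left k (by omega)
    have hk1 : 1 ≤ k := by nlinarith
    have hik : i ≤ k := by nlinarith
    have hinotacc : i ∉ acc := by
      intro hmem
      rcases hinv i hmem with ⟨_, _, _, hlt⟩ | ⟨_, _, hgt, _⟩
      · omega
      · linarith
    have hInv_i : pvInvA n (i + 1) i := Or.inl ⟨hi, ⟨k, hk⟩, hle, by omega⟩
    have hfk : PySem.Int.floordiv n i = k := by rw [hfd, hki]
    by_cases h2 : i ≠ PySem.Int.floordiv n i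
    · have hik2 : i < k := lt_of_le_of_ne hik (by rw [hfk] at h2; exact h2)
      have hkk : n < k * k := by nlinarith
      have hnk : n / k = i := by rw [hk]; exact Int.mul_ediv_cancel i (by omega)
      have hInv_k : pvInvA n (i + 1) k := Or.inr ⟨by omega, ⟨i, by rw [hk]; ring⟩, hkk, by rw [hnk]; omega⟩
      have hknotacc : k ∉ acc := by
        intro hmem
        rcases hinv k hmem with ⟨_, _, hsm, _⟩ | ⟨_, _, _, hfd2⟩
        · linarith
        · rw [hnk] at hfd2; omega
      unfold pvStepA
      rw [if_pos h1, if_pos h2, hfk]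
      by_cases hw : pvWinA length i = true <;> by_cases hw2 : pvWinA length k = true <;>
        simp only [hw, hw2, if_true, if_false, Bool.false_eq_true]
      · refine ⟨?_, ?_⟩
        · have disj1 : acc.Disjoint [i] := by
            intro a ha hb; simp only [List.mem_singleton] at hb; exact hinotacc (hb ▸ ha)
          have nd1 : (acc ++ [i]).Nodup := hnd.append (List.nodup_singleton i) disj1
          have disj2 : (acc ++ [i]).Disjoint [k] := by
            intro a ha hb; simp only [List.mem_singleton] at hb; subst hb
            rcases List.mem_append.mp ha with h | h
            · exact hknotacc h
            · simp only [List.mem_singleton] at h; omega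
          exact nd1.append (List.nodup_singleton k) disj2
        · intro d hd
          simp only [List.mem_append, List.mem_singleton] at hd
          rcases hd with (hd | hd) | hd
          · exact hmono d hd
          · subst hd; exact hInv_i
          · subst hd; exact hInv_k
      · refine ⟨?_, ?_⟩
        · exact hnd.append (List.nodup_singleton i)
            (fun a ha hb => hinotacc ((List.mem_singleton.mp hb) ▸ ha))
        · intro d hd
          simp only [List.mem_append, List.mem_singleton] at hd
          rcases hd with hd | hd
          · exact hmono d hd
          · subst hd; exact hInv_i
      · refine ⟨?_, ?_⟩
        · exact hnd.append (List.nodup_singleton k)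
            (fun a ha hb => hknotacc ((List.mem_singleton.mp hb) ▸ ha))
        · intro d hd
          simp only [List.mem_append, List.mem_singleton] at hd
          rcases hd with hd | hd
          · exact hmono d hd
          · subst hd; exact hInv_k
      · exact ⟨hnd, hmono⟩
    · unfold pvStepA
      rw [if_pos h1, if_neg h2]
      by_cases hw : pvWinA length i = true <;>
        simp only [hw, if_true, if_false, Bool.false_eq_true]
      · refine ⟨?_, ?_⟩
        · exact hnd.append (List.nodup_singleton i)
            (fun a ha hb => hinotacc ((List.mem_singleton.mp hb) ▸ ha))
        · intro d hd
          simp only [List.mem_append, List.mem_singleton] at hd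
          rcases hd with hd | hd
          · exact hmono d hd
          · subst hd; exact hInv_i
      · exact ⟨hnd, hmono⟩
  · unfold pvStepA
    rw [if_neg h1]
    exact ⟨hnd, hmono⟩

-- A's accumulator never repeats an element
lemma nodup_pvLoopA (n length : Int) :
    ∀ (i : Int) (acc : List Int), 1 ≤ i → acc.Nodup →
      (∀ d ∈ acc, pvInvA n i d) →
      (pvLoopA n length i acc).Nodup := by
  intro i acc
  induction i, acc using pvLoopA.induct n length with
  | case2 i acc hgt =>
    intro _ hnd _
    rw [pvLoopA, dif_neg hgt]; exact hnd
  | case1 i acc hle ih =>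
    intro hi hnd hinv
    rw [pvLoopA, dif_pos hle]
    obtain ⟨hnd2, hinv2⟩ := pvStepA_preserves n length i acc hi hle hnd hinv
    exact ih (by omega) hnd2 hinv2

-- for positive n, A's loop collects exactly the divisors of n passing the window test
lemma mem_pvLoopA_one (n length : Int) (hn : 1 ≤ n) (d : Int) :
    d ∈ pvLoopA n length 1 [] ↔ 1 ≤ d ∧ d ∣ n ∧ pvWinA length d = true := by
  rw [mem_pvLoopA n length 1 [] (le_refl 1) d]
  simp only [List.not_mem_nil, false_or]
  constructor
  · rintro ⟨j, hj1, hj2, hmod, hc⟩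
    have hdvd : j ∣ n := (PySem.Int.mod_eq_zero_iff_dvd n j).mp hmod
    have hfd : PySem.Int.floordiv n j = n / j := PySem.Int.floordiv_eq_ediv_of_pos (by omega)
    obtain ⟨k, hk⟩ := hdvd
    have hki : n / j = k := by rw [hk]; exact Int.mul_ediv_cancel_left k (by omega)
    have hk1 : 1 ≤ k := by
      by_contra h
      push_neg at h
      have h2 : j * k ≤ 0 := mul_nonpos_of_nonneg_of_nonpos (by omega) (by omega)
      rw [← hk] at h2; omega
    rcases hc with ⟨rfl, hw⟩ | ⟨hne, rfl, hw⟩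
    · exact ⟨by omega, ⟨k, hk⟩, hw⟩
    · have hfk : PySem.Int.floordiv n j = k := by rw [hfd, hki]
      rw [hfk] at hw ⊢
      exact ⟨by omega, ⟨j, by rw [hk]; ring⟩, hw⟩
  · rintro ⟨hd1, ⟨k, hk⟩, hw⟩
    have hk' : n = k * d := by rw [hk]; ring
    have hk1 : 1 ≤ k := by
      by_contra h
      push_neg at h
      have h2 : d * k ≤ 0 := mul_nonpos_of_nonneg_of_nonpos (by omega) (by omega)
      rw [← hk] at h2; omega
    by_cases hsq : d * d ≤ n
    · exact ⟨d, hd1, hsq, (PySem.Int.mod_eq_zero_iff_dvd n d).mpr ⟨k, hk⟩, Or.inl ⟨rfl, hw⟩⟩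
    · push_neg at hsq
      have hkd : k < d := by
        have h2 : d * k < d * d := by rw [← hk]; exact hsq
        exact lt_of_mul_lt_mul_left h2 (by omega)
      have hkk : k * k ≤ n := by
        have h2 : k * k ≤ k * d := mul_le_mul_of_nonneg_left (le_of_lt hkd) (by omega)
        rw [hk']; linarith
      have hfd : PySem.Int.floordiv n k = n / k := PySem.Int.floordiv_eq_ediv_of_pos (by omega)
      have hnk : n / k = d := by rw [hk']; exact Int.mul_ediv_cancel_left d (by omega)
      have hfk : PySem.Int.floordiv n k = d := by rw [hfd, hnk]
      refine ⟨k, by omega, hkk, (PySem.Int.mod_eq_zero_iff_dvd n k).mpr ⟨d, hk'⟩,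
        Or.inr ⟨by rw [hfk]; omega, by rw [hfk], by rw [hfk]; exact hw⟩⟩

-- the two ports agree on every input
theorem find_divisors_by_length_eq (n length : Int) :
    find_divisors_by_length n length = find_divisors_by_length_alt n length := by
  by_cases hlen : length < 1
  · have hwin : ∀ x, pvWinA length x = false := by
      intro x
      unfold pvWinA
      rw [if_neg (by omega)]
      split_ifs <;> simp <;> omega
    unfold find_divisors_by_length find_divisors_by_length_alt
    rw [if_pos hlen, pvLoopA_win_false n length hwin 1 []]
    simp [PySem.List.sorted_eq_nil_iff]
  · push_neg at hlen
    have hB : find_divisors_by_length_alt n length =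
        (PySem.List.pyRange (10 ^ (length - 1).toNat) (min ((10 : Int) ^ length.toNat - 1) n + 1) 1).filter
          (fun d => PySem.Int.mod n d == 0) := by
      unfold find_divisors_by_length_alt
      rw [if_neg (not_lt.mpr hlen)]
    have hlo1 : (1 : Int) ≤ 10 ^ (length - 1).toNat := one_le_pow₀ (by norm_num)
    rw [hB]
    unfold find_divisors_by_length
    by_cases hn : 1 ≤ n
    · apply PySem.List.sorted_eq_of_perm_of_pairwise_lt
      · rw [List.perm_ext_iff_of_nodup
          (List.Nodup.filter _ (PySem.List.nodup_pyRange_one _ _))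
          (nodup_pvLoopA n length 1 [] (by omega) List.nodup_nil (by intro d h; cases h))]
        intro d
        rw [List.mem_filter, PySem.List.mem_pyRange_one, mem_pvLoopA_one n length hn d]
        have hw : pvWinA length d = decide (10 ^ (length - 1).toNat ≤ d ∧ d ≤ 10 ^ length.toNat - 1) := by
          unfold pvWinA; rw [if_pos hlen]
        rw [hw]
        simp only [beq_iff_eq, decide_eq_true_eq]
        constructor
        · rintro ⟨⟨hlod, hdlt⟩, hmod⟩
          have hdvd : d ∣ n := (PySem.Int.mod_eq_zero_iff_dvd n d).mp hmod
          exact ⟨by omega, hdvd, by omega⟩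
        · rintro ⟨hd1, hdvd, hlod, hdhi⟩
          have hdn : d ≤ n := Int.le_of_dvd (by omega) hdvd
          exact ⟨⟨hlod, by omega⟩, (PySem.Int.mod_eq_zero_iff_dvd n d).mpr hdvd⟩
      · exact List.Pairwise.filter _ (PySem.List.pairwise_lt_pyRange_one _ _)
    · rw [pvLoopA, dif_neg (by omega)]
      rw [PySem.List.pyRange_one_eq_nil (by
        have h2 : min ((10 : Int) ^ length.toNat - 1) n ≤ n := min_le_right _ _
        omega)]
      simp [PySem.List.sorted_eq_nil_iff]

-- ===== VERDICT (by name: the statement is the Claim_ definition above) =====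
theorem find_divisors_by_length_spec : Claim_equal_find_divisors_by_length := by
  intro n length _
  unfold Spec_find_divisors_by_length
  exact find_divisors_by_length_eq n length
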